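-- pv_equiv track=rewrite | github.com/KrithikK7/Audio_watermarking | detect/detect.py | block_interleave
-- ===== SOURCE A (Python) =====
-- import argparse, json, math, os, sys, binascii, hmac, hashlib, struct, csv
-- from typing import List, Tuple
--
-- def block_interleave(bits: List[int], depth: int) -> List[int]:
--     if depth <= 1:
--         return bits
--     n = len(bits)
--     cols = depth
--     rows = math.ceil(n / cols)
--     padded = bits + [0] * (rows * cols - n)
--     out = []
--     for c in range(cols):
--         for r in range(rows):
--             out.append(padded[r * cols + c])
--     return out[:n]
-- ===== SOURCE B (Python) =====
-- from typing import List
--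
-- def block_interleave(bits: List[int], depth: int) -> List[int]:
--     if depth <= 1:
--         return bits
--     # deal the bits round-robin into `depth` piles, then concatenate the piles,
--     # topping up each short pile with zeros to the height of the first pile
--     piles = [[] for _ in range(depth)]
--     for i, b in enumerate(bits):
--         piles[i % depth].append(b)
--     rows = len(piles[0])
--     out = []
--     for p in piles:
--         out.extend(p)
--         out.extend([0] * (rows - len(p)))
--     return out[:len(bits)]
-- ===== Notes on version B (the rewrite author's own statement) =====
-- stated objective: alternative
-- what changed: Replaces A's padded-grid construction and nested column/row gather loops with card-dealing: one pass distributes each bit round-robin into depth pile lists (no index arithmetic into a padded copy), then the piles are concatenated, each topped up with zeros to the first pile's height, and truncated to n.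
import Mathlib
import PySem

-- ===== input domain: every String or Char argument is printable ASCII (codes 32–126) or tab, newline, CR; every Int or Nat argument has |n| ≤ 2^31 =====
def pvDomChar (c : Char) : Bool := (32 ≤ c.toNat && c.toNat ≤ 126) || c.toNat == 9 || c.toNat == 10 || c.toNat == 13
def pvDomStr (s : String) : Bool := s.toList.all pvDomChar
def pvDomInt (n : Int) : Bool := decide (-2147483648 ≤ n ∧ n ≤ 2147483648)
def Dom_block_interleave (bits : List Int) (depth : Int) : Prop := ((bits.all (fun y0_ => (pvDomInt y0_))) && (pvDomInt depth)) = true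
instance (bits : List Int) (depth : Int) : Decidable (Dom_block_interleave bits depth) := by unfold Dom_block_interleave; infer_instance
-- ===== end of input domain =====

-- B replaces A's padded-grid gather (nested column/row loops over a zero-padded
-- copy) with card-dealing: one pass distributes the bits round-robin into depth
-- piles, which are then concatenated, zero-padded to equal height and truncated
-- (objective: alternative).


-- ===== PORT A =====
-- math.ceil(n / cols) is ported as the exact integer ceiling -((-n) // cols); exact
-- since n, cols are ints with cols ≥ 2, n ≥ 0.  padded[r*cols+c] is ported with
-- default 0, exact because the index is always in range (padded has rows*cols items).
def block_interleave (bits : List Int) (depth : Int) : List Int :=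
  if depth ≤ 1 then bits
  else
    let n : Int := bits.length
    let cols : Int := depth
    let rows : Int := -(PySem.Int.floordiv (-n) cols)
    let padded : List Int := bits ++ List.replicate (rows * cols - n).toNat 0
    let out : List Int :=
      (PySem.List.pyRange 0 cols).foldl (fun acc c =>
        (PySem.List.pyRange 0 rows).foldl (fun acc r =>
          acc ++ [PySem.List.pyGetD padded (r * cols + c) 0]) acc) []
    PySem.List.slice out none (some n)

-- ===== PORT B =====
-- piles[i % depth].append(b) is ported as List.modify at (i % depth).toNat: exact,
-- the index is nonnegative (depth ≥ 2) and < depth = piles.length.  piles[0] is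
-- ported with default [], exact since piles has depth ≥ 2 entries.  Pile lengths
-- never exceed rows, so Nat subtraction in the zero top-up matches Python.
def block_interleave_alt (bits : List Int) (depth : Int) : List Int :=
  if depth ≤ 1 then bits
  else
    let piles : List (List Int) :=
      (PySem.List.enumerate bits).foldl (fun ps ib =>
        ps.modify (PySem.Int.mod ib.1 depth).toNat (fun p => p ++ [ib.2]))
        (List.replicate depth.toNat [])
    let rows : Nat := (piles.getD 0 []).length
    let out : List Int :=
      piles.foldl (fun acc p => acc ++ p ++ List.replicate (rows - p.length) 0) []
    PySem.List.slice out none (some (bits.length : Int))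

-- ===== PRECONDITION & SPEC =====
def Spec_block_interleave (bits : List Int) (depth : Int) (out : List Int) : Prop := out = block_interleave_alt bits depth
instance (bits : List Int) (depth : Int) (out : List Int) : Decidable (Spec_block_interleave bits depth out) := by unfold Spec_block_interleave; infer_instance

-- ===== CLAIM (what is proved, stated in full; the proofs are below) =====
def Claim_equal_block_interleave : Prop := ∀ (bits : List Int) (depth : Int), Dom_block_interleave bits depth → Spec_block_interleave bits depth (block_interleave bits depth)

-- ===== LEMMAS AND PROOFS =====

-- pvCnt cols m c = how many of the first m indices fall in pile c (index i goes to pile i % cols)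
def pvCnt (cols m c : Nat) : Nat := m / cols + (if c < m % cols then 1 else 0)

-- the contents of pile c after the first m bits have been dealt
def pvPick (bits : List Int) (cols m c : Nat) : List Int :=
  (List.range (pvCnt cols m c)).map (fun r => bits.getD (r * cols + c) 0)

theorem pvCnt_zero (cols c : Nat) : pvCnt cols 0 c = 0 := by
  simp [pvCnt]

theorem pvCnt_self (cols m : Nat) : pvCnt cols m (m % cols) = m / cols := by
  simp [pvCnt]

theorem pvDiv_exact (cols q r : Nat) (hc : 0 < cols) (hr : r < cols) :
    (cols * q + r) / cols = q := by
  rw [Nat.mul_add_div hc, Nat.div_eq_of_lt hr, Nat.add_zero]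

theorem pvMod_exact (cols q r : Nat) (hr : r < cols) :
    (cols * q + r) % cols = r := by
  rw [Nat.mul_add_mod, Nat.mod_eq_of_lt hr]

theorem pvCnt_succ (cols m c : Nat) (hc : 0 < cols) (hclt : c < cols) :
    pvCnt cols (m + 1) c = if c = m % cols then pvCnt cols m c + 1 else pvCnt cols m c := by
  have hdm : cols * (m / cols) + m % cols = m := Nat.div_add_mod m cols
  have hs : m % cols < cols := Nat.mod_lt _ hc
  by_cases hlast : m % cols + 1 = cols
  · have hm1 : m + 1 = cols * (m / cols + 1) + 0 := by
      have : cols * (m / cols + 1) = cols * (m / cols) + cols := by ring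
      omega
    have hdiv : (m + 1) / cols = m / cols + 1 := by
      rw [hm1, pvDiv_exact _ _ _ hc hc]
    have hmod : (m + 1) % cols = 0 := by
      rw [hm1, pvMod_exact _ _ _ hc]
    unfold pvCnt
    rw [hdiv, hmod]
    split_ifs <;> omega
  · have hm1 : m + 1 = cols * (m / cols) + (m % cols + 1) := by omega
    have hdiv : (m + 1) / cols = m / cols := by
      rw [hm1, pvDiv_exact _ _ _ hc (by omega)]
    have hmod : (m + 1) % cols = m % cols + 1 := by
      rw [hm1, pvMod_exact _ _ _ (by omega)]
    unfold pvCnt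
    rw [hdiv, hmod]
    split_ifs <;> omega

-- r-th member of pile c is bit r*cols+c; it exists exactly when that index is < n
theorem pvCnt_lt_iff (cols n c r : Nat) (hc : 0 < cols) (hclt : c < cols) :
    r < pvCnt cols n c ↔ r * cols + c < n := by
  have hdm : cols * (n / cols) + n % cols = n := Nat.div_add_mod n cols
  have hs : n % cols < cols := Nat.mod_lt _ hc
  unfold pvCnt
  split_ifs with h
  · constructor
    · intro hr
      have : r * cols ≤ (n / cols) * cols := Nat.mul_le_mul_right _ (by omega)
      have : (n / cols) * cols = cols * (n / cols) := Nat.mul_comm _ _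
      omega
    · intro hr
      by_contra hcon
      have h1 : (n / cols + 1) * cols ≤ r * cols := Nat.mul_le_mul_right _ (by omega)
      have h2 : (n / cols + 1) * cols = cols * (n / cols) + cols := by ring
      omega
  · constructor
    · intro hr
      have h1 : (r + 1) * cols ≤ (n / cols) * cols := Nat.mul_le_mul_right _ (by omega)
      have h2 : (r + 1) * cols = r * cols + cols := by ring
      have h3 : (n / cols) * cols = cols * (n / cols) := Nat.mul_comm _ _
      omega
    · intro hr
      by_contra hcon
      have h1 : (n / cols) * cols ≤ r * cols := Nat.mul_le_mul_right _ (by omega)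
      have h2 : (n / cols) * cols = cols * (n / cols) := Nat.mul_comm _ _
      omega

theorem pvCnt_le (cols n c : Nat) : pvCnt cols n c ≤ pvCnt cols n 0 := by
  unfold pvCnt
  split_ifs <;> omega

-- List.modify on a map over a range rewrites to a pointwise if
theorem pvModify_map_range {α : Type} (f : Nat → α) (g : α → α) (k n : Nat) :
    ((List.range n).map f).modify k g
      = (List.range n).map (fun c => if c = k then g (f c) else f c) := by
  apply List.ext_getElem
  · simp
  · intro j hj1 hj2
    have hjn : j < n := by simpa using hj2
    rw [List.getElem_modify]
    simp [eq_comm]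

-- dealing the remaining bits (from position m) finishes the piles
theorem pvDeal_go (bits : List Int) (colsN : Nat) (hc : 0 < colsN) :
    ∀ (tl : List Int) (m : Nat), tl = bits.drop m → m ≤ bits.length →
    (PySem.List.enumerate tl (m : Int)).foldl (fun ps ib =>
        ps.modify (PySem.Int.mod ib.1 (colsN : Int)).toNat (fun p => p ++ [ib.2]))
      ((List.range colsN).map (pvPick bits colsN m))
    = (List.range colsN).map (pvPick bits colsN bits.length) := by
  intro tl
  induction tl with
  | nil =>
    intro m hdrop hm
    have hlen : bits.length ≤ m := by
      by_contra h
      have hpos : 0 < (bits.drop m).length := by simp; omega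
      exact (List.ne_nil_of_length_pos hpos) hdrop.symm
    have hm' : m = bits.length := le_antisymm hm hlen
    subst hm'
    simp [PySem.List.enumerate]
  | cons x tl' ih =>
    intro m hdrop hm
    have hmlt : m < bits.length := by
      by_contra h
      rw [List.drop_eq_nil_of_le (by omega)] at hdrop
      exact absurd hdrop (by simp)
    have hx : x = bits.getD m 0 := by
      have h0 : (bits.drop m)[0]? = bits[m]? := by
        rw [List.getElem?_drop]; simp
      rw [← hdrop] at h0
      simp only [List.getElem?_cons_zero] at h0
      rw [List.getD_eq_getElem?_getD, ← h0]
      rfl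
    have htl' : tl' = bits.drop (m + 1) := by
      have : (bits.drop m).tail = bits.drop (m + 1) := by
        rw [List.tail_drop]
      rw [← hdrop] at this
      simpa using this
    rw [PySem.List.enumerate_cons, List.foldl_cons]
    have hidx : (PySem.Int.mod (m : Int) (colsN : Int)).toNat = m % colsN := by
      rw [PySem.Int.mod_natCast, Int.toNat_natCast]
    rw [hidx, pvModify_map_range]
    have hstep : (fun c => if c = m % colsN
          then pvPick bits colsN m c ++ [x] else pvPick bits colsN m c)
        = fun c => if c < colsN then pvPick bits colsN (m + 1) c
            else pvPick bits colsN m c := by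
      funext c
      by_cases hcc : c < colsN
      · rw [if_pos hcc]
        by_cases he : c = m % colsN
        · rw [if_pos he]
          unfold pvPick
          rw [pvCnt_succ colsN m c hc hcc, if_pos he, List.range_succ,
            List.map_append]
          subst he
          rw [pvCnt_self]
          have hdm2 : m / colsN * colsN + m % colsN = m := by
            rw [Nat.mul_comm]; exact Nat.div_add_mod m colsN
          simp [hdm2, hx]
        · rw [if_neg he]
          unfold pvPick
          rw [pvCnt_succ colsN m c hc hcc, if_neg he]
      · rw [if_neg hcc, if_neg (by
          intro he
          exact hcc (he ▸ Nat.mod_lt _ hc))]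
    rw [hstep]
    have hmap : (List.range colsN).map (fun c => if c < colsN
          then pvPick bits colsN (m + 1) c else pvPick bits colsN m c)
        = (List.range colsN).map (pvPick bits colsN (m + 1)) := by
      apply List.map_congr_left
      intro c hcm
      rw [if_pos (List.mem_range.mp hcm)]
    rw [hmap]
    have hcast : (m : Int) + 1 = ((m + 1 : Nat) : Int) := by push_cast; ring
    rw [hcast]
    exact ih (m + 1) htl' hmlt

-- reading the padded list is: the bit if in range, else the padding zero
theorem pvPadded_getD (bits : List Int) (N k : Nat) (hn : bits.length ≤ N) (hk : k < N) :
    (bits ++ List.replicate (N - bits.length) 0).getD k 0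
      = if k < bits.length then bits.getD k 0 else 0 := by
  by_cases h : k < bits.length
  · rw [List.getD_eq_getElem?_getD, List.getElem?_append_left h,
      ← List.getD_eq_getElem?_getD, if_pos h]
  · rw [List.getD_eq_getElem?_getD, List.getElem?_append_right (by omega),
      List.getElem?_replicate, if_pos (by omega), if_neg h]
    rfl

theorem pvIdx_lt (r c rowsN colsN : Nat) (hr : r < rowsN) (hc : c < colsN) :
    r * colsN + c < rowsN * colsN := by
  have h1 : (r + 1) * colsN ≤ rowsN * colsN := Nat.mul_le_mul_right _ (by omega)
  have h2 : (r + 1) * colsN = r * colsN + colsN := by ring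
  omega

-- the finished pile c, topped up with zeros, is column c of A's padded grid
theorem pvColumn (bits : List Int) (colsN rowsN c : Nat) (hc : 0 < colsN)
    (hclt : c < colsN) (hn : bits.length ≤ rowsN * colsN)
    (hcle : pvCnt colsN bits.length c ≤ rowsN) :
    pvPick bits colsN bits.length c
        ++ List.replicate (rowsN - pvCnt colsN bits.length c) 0
      = (List.range rowsN).map (fun r =>
          PySem.List.pyGetD (bits ++ List.replicate (rowsN * colsN - bits.length) 0)
            ((r : Nat) * (colsN : Int) + (c : Nat)) 0) := by
  set cnt := pvCnt colsN bits.length c with hcnt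
  rw [show List.range rowsN = List.range (cnt + (rowsN - cnt)) from by
    rw [Nat.add_sub_cancel' hcle], List.range_add, List.map_append]
  congr 1
  · unfold pvPick
    rw [← hcnt]
    apply List.map_congr_left
    intro r hrm
    have hr : r < cnt := List.mem_range.mp hrm
    have hrlt : r * colsN + c < bits.length := by
      rw [← pvCnt_lt_iff colsN bits.length c r hc hclt]; exact hr
    have hcast : ((r : Nat) : Int) * (colsN : Int) + ((c : Nat) : Int)
        = ((r * colsN + c : Nat) : Int) := by push_cast; ring
    rw [hcast, PySem.List.pyGetD_natCast,
      pvPadded_getD bits (rowsN * colsN) _ hn (by omega), if_pos hrlt]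
  · rw [List.map_map]
    symm
    rw [List.eq_replicate_iff]
    refine ⟨by simp, ?_⟩
    intro b hb
    rw [List.mem_map] at hb
    obtain ⟨t, htm, hbe⟩ := hb
    have ht : t < rowsN - cnt := List.mem_range.mp htm
    have hge : ¬ (cnt + t) * colsN + c < bits.length := by
      rw [← pvCnt_lt_iff colsN bits.length c (cnt + t) hc hclt, ← hcnt]
      omega
    have hcast : (((cnt + t : Nat)) : Int) * (colsN : Int) + ((c : Nat) : Int)
        = (((cnt + t) * colsN + c : Nat) : Int) := by push_cast; ring
    simp only [Function.comp] at hbe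
    rw [← hbe, hcast, PySem.List.pyGetD_natCast,
      pvPadded_getD bits (rowsN * colsN) _ hn
        (pvIdx_lt _ _ _ _ (by omega) hclt), if_neg hge]

theorem pvFlatMap_congr {α β : Type} (l : List α) (f g : α → List β)
    (h : ∀ x ∈ l, f x = g x) : l.flatMap f = l.flatMap g := by
  induction l with
  | nil => rfl
  | cons x xs ih =>
    rw [List.flatMap_cons, List.flatMap_cons, h x (by simp),
      ih (fun y hy => h y (by simp [hy]))]

-- the row count B reads off pile 0 equals A's computed ceiling
theorem pvRows_eq (colsN rowsN n : Nat) (hc : 0 < colsN)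
    (h1 : n ≤ rowsN * colsN) (h2 : rowsN * colsN < n + colsN) :
    pvCnt colsN n 0 = rowsN := by
  have hdm : colsN * (n / colsN) + n % colsN = n := Nat.div_add_mod n colsN
  have hs : n % colsN < colsN := Nat.mod_lt _ hc
  unfold pvCnt
  have hq1 : (n / colsN) * colsN = colsN * (n / colsN) := Nat.mul_comm _ _
  split_ifs with h
  · -- n % colsN > 0 : rowsN = n / colsN + 1
    have ha : n / colsN < rowsN := by
      by_contra hcon
      have : rowsN * colsN ≤ (n / colsN) * colsN := Nat.mul_le_mul_right _ (by omega)
      omega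
    have hb : rowsN < n / colsN + 2 := by
      by_contra hcon
      have h3 : (n / colsN + 2) * colsN ≤ rowsN * colsN := Nat.mul_le_mul_right _ (by omega)
      have h4 : (n / colsN + 2) * colsN = colsN * (n / colsN) + 2 * colsN := by ring
      omega
    omega
  · -- n % colsN = 0 : rowsN = n / colsN
    have ha : n / colsN ≤ rowsN := by
      by_contra hcon
      have : rowsN * colsN + colsN ≤ (n / colsN) * colsN := by
        have := Nat.mul_le_mul_right colsN (show rowsN + 1 ≤ n / colsN by omega)
        have he : (rowsN + 1) * colsN = rowsN * colsN + colsN := by ring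
        omega
      omega
    have hb : rowsN < n / colsN + 1 := by
      by_contra hcon
      have h3 : (n / colsN + 1) * colsN ≤ rowsN * colsN := Nat.mul_le_mul_right _ (by omega)
      have h4 : (n / colsN + 1) * colsN = colsN * (n / colsN) + colsN := by ring
      omega
    omega

-- the whole equivalence, over Nat-sized grid parameters
theorem pvMain (bits : List Int) (colsN rowsN : Nat) (hc : 0 < colsN)
    (hn : bits.length ≤ rowsN * colsN) (hup : rowsN * colsN < bits.length + colsN) :
    PySem.List.slice
      ((PySem.List.pyRange 0 (colsN : Int)).foldl (fun acc c =>
        (PySem.List.pyRange 0 (rowsN : Int)).foldl (fun acc r =>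
          acc ++ [PySem.List.pyGetD
            (bits ++ List.replicate (rowsN * colsN - bits.length) 0)
            (r * (colsN : Int) + c) 0]) acc) [])
      none (some (bits.length : Int))
    = PySem.List.slice
      (let piles : List (List Int) :=
        (PySem.List.enumerate bits).foldl (fun ps ib =>
          ps.modify (PySem.Int.mod ib.1 (colsN : Int)).toNat (fun p => p ++ [ib.2]))
          (List.replicate colsN []);
       let rows : Nat := (piles.getD 0 []).length;
       piles.foldl (fun acc p => acc ++ p ++ List.replicate (rows - p.length) 0) [])
      none (some (bits.length : Int)) := by
  -- B side: the dealing fold fills the piles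
  have hinit : (List.replicate colsN ([] : List Int))
      = (List.range colsN).map (pvPick bits colsN 0) := by
    have hp0 : pvPick bits colsN 0 = fun _ => ([] : List Int) := by
      funext c; simp [pvPick, pvCnt_zero]
    rw [hp0, List.map_const', List.length_range]
  have hpiles : (PySem.List.enumerate bits).foldl (fun ps ib =>
        ps.modify (PySem.Int.mod ib.1 (colsN : Int)).toNat (fun p => p ++ [ib.2]))
        (List.replicate colsN [])
      = (List.range colsN).map (pvPick bits colsN bits.length) := by
    rw [hinit]
    have := pvDeal_go bits colsN hc bits 0 (by simp) (by omega)
    simpa using this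
  simp only [hpiles]
  -- the first pile's length is A's row count
  have hrowsid : pvCnt colsN bits.length 0 = rowsN := pvRows_eq colsN rowsN bits.length hc hn hup
  have hhead : (((List.range colsN).map (pvPick bits colsN bits.length)).getD 0 []).length
      = rowsN := by
    have hget : ((List.range colsN).map (pvPick bits colsN bits.length))[0]?
        = some (pvPick bits colsN bits.length 0) := by
      rw [List.getElem?_map, List.getElem?_range hc]
      rfl
    rw [List.getD_eq_getElem?_getD, hget]
    simpa [pvPick] using hrowsid
  rw [hhead]
  -- B's concatenation loop is a flatMap over the piles
  have hfold : ((List.range colsN).map (pvPick bits colsN bits.length)).foldl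
        (fun acc p => acc ++ p ++ List.replicate (rowsN - p.length) 0) []
      = (List.range colsN).flatMap (fun c =>
          pvPick bits colsN bits.length c
            ++ List.replicate (rowsN - (pvPick bits colsN bits.length c).length) 0) := by
    have hfun : (fun (acc : List Int) (p : List Int) =>
          acc ++ p ++ List.replicate (rowsN - p.length) 0)
        = fun acc p => acc ++ (p ++ List.replicate (rowsN - p.length) 0) := by
      funext acc p; rw [List.append_assoc]
    rw [hfun, List.foldl_map, PySem.List.foldl_append_eq_flatMap, List.nil_append]
  rw [hfold]
  -- A side: the gather loops are a flatMap over the columns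
  rw [PySem.List.pyRange_zero_natCast colsN, PySem.List.pyRange_zero_natCast rowsN]
  rw [List.foldl_map]
  simp only [List.foldl_map, PySem.List.foldl_append_singleton_eq_map]
  rw [PySem.List.foldl_append_eq_flatMap, List.nil_append]
  -- columnwise equality
  congr 1
  apply pvFlatMap_congr
  intro c hcm
  have hclt : c < colsN := List.mem_range.mp hcm
  have hlenp : (pvPick bits colsN bits.length c).length = pvCnt colsN bits.length c := by
    simp [pvPick]
  have hcle : pvCnt colsN bits.length c ≤ rowsN := by
    rw [← hrowsid]; exact pvCnt_le colsN bits.length c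
  rw [hlenp]
  exact (pvColumn bits colsN rowsN c hc hclt hn hcle).symm

-- ===== VERDICT (by name: the statement is the Claim_ definition above) =====
theorem block_interleave_spec : Claim_equal_block_interleave := by
  intro bits depth _
  unfold Spec_block_interleave block_interleave block_interleave_alt
  by_cases h : depth ≤ 1
  · simp [h]
  · simp only [if_neg h]
    have hd2 : 2 ≤ depth := by omega
    set colsN : Nat := depth.toNat with hcolsdef
    have hdepth : depth = (colsN : Int) := by omega
    have hc : 0 < colsN := by omega
    set q : Int := PySem.Int.floordiv (-(bits.length : Int)) depth with hq
    have hdm := PySem.Int.floordiv_mul_add_mod (-(bits.length : Int)) depth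
    have hm0 : 0 ≤ PySem.Int.mod (-(bits.length : Int)) depth :=
      PySem.Int.mod_nonneg _ (by omega)
    have hm1 : PySem.Int.mod (-(bits.length : Int)) depth < depth :=
      PySem.Int.mod_lt _ (by omega)
    rw [← hq] at hdm
    have hrows0 : 0 ≤ -q := by nlinarith
    set rowsN : Nat := (-q).toNat with hrowsdef
    have hrowseq : -q = (rowsN : Int) := by omega
    have hcover : (bits.length : Int) ≤ (rowsN : Int) * (colsN : Int) := by
      rw [← hrowseq, ← hdepth]; nlinarith
    have hn : bits.length ≤ rowsN * colsN := by exact_mod_cast hcover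
    have hupI : (rowsN : Int) * (colsN : Int) < (bits.length : Int) + (colsN : Int) := by
      rw [← hrowseq, ← hdepth]; nlinarith
    have hup : rowsN * colsN < bits.length + colsN := by exact_mod_cast hupI
    have htn : ((rowsN : Int) * (colsN : Int) - (bits.length : Int)).toNat
        = rowsN * colsN - bits.length := by
      rw [show ((rowsN : Int)) * ((colsN : Int)) = ((rowsN * colsN : Nat) : Int) by push_cast; ring,
        Int.toNat_sub]
    rw [hdepth, hrowseq, htn]
    exact pvMain bits colsN rowsN hc hn hup
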